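-- pv_equiv track=rewrite | github.com/nairarunraj/advent_of_code | y2020/day11.py | is_north_seat_occupied
-- ===== SOURCE A (Python) =====
-- def is_north_seat_occupied(seating_arr, row, col, row_len, col_len, occupied_seat_map, key):
--     if key in occupied_seat_map:
--         return occupied_seat_map[key]
--
--     if row - 1 < 0:
--         return False
--
--     if seating_arr[row - 1][col] == 'L':
--         return False
--
--     if seating_arr[row - 1][col] == '#':
--         return True
--
--     next_key = str(row - 1) + ":" + str(col) + ":N"
--     is_seat_occupied = is_north_seat_occupied(seating_arr, row - 1, col, row_len, col_len, occupied_seat_map, next_key)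
--     occupied_seat_map[key] = is_seat_occupied
--     return is_seat_occupied
-- ===== SOURCE B (Python) =====
-- def is_north_seat_occupied(seating_arr, row, col, row_len, col_len, occupied_seat_map, key):
--     if key in occupied_seat_map:
--         return occupied_seat_map[key]
--
--     to_cache = []
--     r = row
--     k = key
--     while True:
--         if r - 1 < 0:
--             result = False
--             break
--         cell = seating_arr[r - 1][col]
--         if cell == 'L':
--             result = False
--             break
--         if cell == '#':
--             result = True
--             break
--         # floor: remember this key for caching, then step up
--         to_cache.append(k)
--         next_key = str(r - 1) + ":" + str(col) + ":N"
--         if next_key in occupied_seat_map: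
--             result = occupied_seat_map[next_key]
--             break
--         k = next_key
--         r -= 1
--
--     for cached_key in to_cache:
--         occupied_seat_map[cached_key] = result
--     return result
-- ===== Notes on version B (the rewrite author's own statement) =====
-- stated objective: alternative
-- what changed: Replaces A's self-recursive memoized lookup with an iterative while-loop that scans upward with a row pointer, short-circuits on a cached next_key, and batch-writes the collected floor-path keys to the cache after the loop.
-- outside the precondition, e.g. on is_north_seat_occupied([[], ['L']], 2, 0, 2, 1, {}, '2:0:N'): A returns False, B returns False
import Mathlib
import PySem

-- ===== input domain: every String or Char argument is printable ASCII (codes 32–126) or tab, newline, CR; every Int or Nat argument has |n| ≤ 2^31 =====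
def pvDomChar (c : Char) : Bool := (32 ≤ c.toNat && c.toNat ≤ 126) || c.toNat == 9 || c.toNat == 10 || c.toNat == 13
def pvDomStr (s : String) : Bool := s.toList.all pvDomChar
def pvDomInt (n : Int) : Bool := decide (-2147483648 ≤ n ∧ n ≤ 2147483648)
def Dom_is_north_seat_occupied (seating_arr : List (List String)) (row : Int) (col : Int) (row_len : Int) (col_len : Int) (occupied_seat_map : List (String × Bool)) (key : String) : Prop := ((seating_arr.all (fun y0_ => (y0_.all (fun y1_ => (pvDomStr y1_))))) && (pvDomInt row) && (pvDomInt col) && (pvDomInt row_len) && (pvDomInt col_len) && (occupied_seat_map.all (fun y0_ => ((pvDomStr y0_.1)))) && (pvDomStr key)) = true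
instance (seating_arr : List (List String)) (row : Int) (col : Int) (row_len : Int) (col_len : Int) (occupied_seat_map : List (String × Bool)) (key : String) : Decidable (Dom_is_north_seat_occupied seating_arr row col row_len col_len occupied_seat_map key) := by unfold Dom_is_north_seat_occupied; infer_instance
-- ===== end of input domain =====

-- B replaces A's memoized recursion by an iterative upward scan (same return value;
-- A's and B's in-place cache writes to occupied_seat_map are identical but only the
-- RETURN value is modeled and proved here).

-- ===== PORT A =====
-- Literal port of A's recursion; the map is an assoc list, `key in d` / `d[key]` = first-match lookup.
def is_north_seat_occupied (seating_arr : List (List String)) (row : Int) (col : Int) (row_len : Int) (col_len : Int) (occupied_seat_map : List (String × Bool)) (key : String) : Bool :=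
  match occupied_seat_map.lookup key with
  | some v => v
  | none =>
    if _h : row - 1 < 0 then false
    else
      match PySem.List.pyGet? seating_arr (row - 1) with
      | none => false      -- IndexError in Python; excluded by Pre_
      | some row_list =>
        match PySem.List.pyGet? row_list col with
        | none => false    -- IndexError in Python; excluded by Pre_
        | some cell =>
          if cell = "L" then false
          else if cell = "#" then true
          else
            is_north_seat_occupied seating_arr (row - 1) col row_len col_len occupied_seat_map
              (PySem.Int.toStr (row - 1) ++ ":" ++ PySem.Int.toStr col ++ ":N")
termination_by row.toNat
decreasing_by omega

-- ===== PORT B =====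
-- Port of B's while-loop: an upward scan with the next_key cache short-circuit.
-- (B's to_cache bookkeeping only feeds the in-place cache writes, which do not affect
-- the return value and are not modeled.)
def pvNorthScan (seating_arr : List (List String)) (col : Int) (occupied_seat_map : List (String × Bool)) (r : Int) : Bool :=
  if _h : r - 1 < 0 then false
  else
    match PySem.List.pyGet? seating_arr (r - 1) with
    | none => false      -- IndexError in Python; excluded by Pre_
    | some row_list =>
      match PySem.List.pyGet? row_list col with
      | none => false    -- IndexError in Python; excluded by Pre_
      | some cell =>
        if cell = "L" then false
        else if cell = "#" then true
        else
          match occupied_seat_map.lookup (PySem.Int.toStr (r - 1) ++ ":" ++ PySem.Int.toStr col ++ ":N") with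
          | some v => v
          | none => pvNorthScan seating_arr col occupied_seat_map (r - 1)
termination_by r.toNat
decreasing_by omega

def is_north_seat_occupied_alt (seating_arr : List (List String)) (row : Int) (col : Int) (row_len : Int) (col_len : Int) (occupied_seat_map : List (String × Bool)) (key : String) : Bool :=
  match occupied_seat_map.lookup key with
  | some v => v
  | none => pvNorthScan seating_arr col occupied_seat_map row

-- ===== PRECONDITION & SPEC =====
-- Pre_ excludes the inputs where Python A raises IndexError (an out-of-range row or
-- column access during the upward scan). It is conservative: it also excludes some
-- inputs where an early 'L'/'#' cell stops A before it would reach an out-of-range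
-- cell — see the cite in claim.json.
def Pre_is_north_seat_occupied (seating_arr : List (List String)) (row : Int) (col : Int) (row_len : Int) (col_len : Int) (occupied_seat_map : List (String × Bool)) (key : String) : Prop :=
  occupied_seat_map.lookup key ≠ none ∨ row ≤ 0 ∨
    (row ≤ (seating_arr.length : Int) ∧ ∀ l ∈ seating_arr, PySem.Raise.InRange l.length col)
instance (seating_arr : List (List String)) (row : Int) (col : Int) (row_len : Int) (col_len : Int) (occupied_seat_map : List (String × Bool)) (key : String) : Decidable (Pre_is_north_seat_occupied seating_arr row col row_len col_len occupied_seat_map key) := by unfold Pre_is_north_seat_occupied; infer_instance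

def pvWitness_is_north_seat_occupied : List (List String) × Int × Int × Int × Int × (List (String × Bool)) × String :=
  ([[".", "."], ["#", "."]], 2, 0, 2, 2, [("0:1:N", true)], "2:0:N")

def Spec_is_north_seat_occupied (seating_arr : List (List String)) (row : Int) (col : Int) (row_len : Int) (col_len : Int) (occupied_seat_map : List (String × Bool)) (key : String) (out : Bool) : Prop := out = is_north_seat_occupied_alt seating_arr row col row_len col_len occupied_seat_map key
instance (seating_arr : List (List String)) (row : Int) (col : Int) (row_len : Int) (col_len : Int) (occupied_seat_map : List (String × Bool)) (key : String) (out : Bool) : Decidable (Spec_is_north_seat_occupied seating_arr row col row_len col_len occupied_seat_map key out) := by unfold Spec_is_north_seat_occupied; infer_instance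

-- ===== CLAIM (what is proved, stated in full; the proofs are below) =====
def Claim_equal_is_north_seat_occupied : Prop := ∀ (seating_arr : List (List String)) (row : Int) (col : Int) (row_len : Int) (col_len : Int) (occupied_seat_map : List (String × Bool)) (key : String), Dom_is_north_seat_occupied seating_arr row col row_len col_len occupied_seat_map key → Pre_is_north_seat_occupied seating_arr row col row_len col_len occupied_seat_map key → Spec_is_north_seat_occupied seating_arr row col row_len col_len occupied_seat_map key (is_north_seat_occupied seating_arr row col row_len col_len occupied_seat_map key)

-- ===== LEMMAS AND PROOFS =====

-- A equals the memo-check followed by the iterative scan, on ALL inputs (the two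
-- ports resolve the out-of-range accesses to the same default at the same cells).
theorem pv_A_eq_scan (seating_arr : List (List String)) (col : Int) (row_len col_len : Int) (occupied_seat_map : List (String × Bool)) :
    ∀ (n : Nat) (row : Int) (key : String), row.toNat ≤ n →
      is_north_seat_occupied seating_arr row col row_len col_len occupied_seat_map key =
        (match occupied_seat_map.lookup key with
         | some v => v
         | none => pvNorthScan seating_arr col occupied_seat_map row) := by
  intro n
  induction n with
  | zero =>
    intro row key hle
    rw [is_north_seat_occupied, pvNorthScan]
    have h : row - 1 < 0 := by omega
    simp [h]
  | succ n ih =>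
    intro row key hle
    rw [is_north_seat_occupied, pvNorthScan]
    cases occupied_seat_map.lookup key with
    | some v => rfl
    | none =>
      by_cases h : row - 1 < 0
      · simp [h]
      · simp only [h, dite_false]
        cases PySem.List.pyGet? seating_arr (row - 1) with
        | none => rfl
        | some row_list =>
          dsimp only
          cases PySem.List.pyGet? row_list col with
          | none => rfl
          | some cell =>
            dsimp only
            by_cases hL : cell = "L"
            · simp [hL]
            · by_cases hH : cell = "#"
              · simp [hH]
              · simp only [if_neg hL, if_neg hH]
                exact ih (row - 1) _ (by omega)

-- ===== VERDICT (by name: the statement is the Claim_ definition above) =====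
theorem is_north_seat_occupied_spec : Claim_equal_is_north_seat_occupied := by
  intro seating_arr row col row_len col_len occupied_seat_map key _ _
  unfold Spec_is_north_seat_occupied is_north_seat_occupied_alt
  exact pv_A_eq_scan seating_arr col row_len col_len occupied_seat_map row.toNat row key le_rfl
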